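-- pv_equiv track=rewrite | github.com/aymansiddiki0-stack/realtime-event-detection-with-automated-alerts | src/event_detector.py | filter_high_priority
-- ===== SOURCE A (Python) =====
-- from typing import List, Dict, Tuple
--
-- def filter_high_priority(detected_events: Dict[str, List[Dict]],
--                         min_severity: str = 'medium') -> List[Dict]:
--     """Filter for high-priority events"""
--     severity_levels = {'low': 0, 'medium': 1, 'high': 2, 'critical': 3}
--     min_level = severity_levels.get(min_severity, 1)
--
--     priority_events = []
--
--     for event_type, events in detected_events.items():
--         for event in events:
--             severity = event.get('severity', 'low')
--             if severity_levels.get(severity, 0) >= min_level: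
--                 priority_events.append(event)
--
--     # Sort by severity
--     priority_events.sort(
--         key=lambda x: severity_levels.get(x.get('severity', 'low'), 0),
--         reverse=True
--     )
--
--     return priority_events
-- ===== SOURCE B (Python) =====
-- def filter_high_priority(detected_events, min_severity='medium'):
--     """Filter for high-priority events (bucket pass instead of filter+sort)."""
--     severity_levels = {'low': 0, 'medium': 1, 'high': 2, 'critical': 3}
--     min_level = severity_levels.get(min_severity, 1)
--     b0, b1, b2, b3 = [], [], [], []
--     for events in detected_events.values():
--         for event in events:
--             level = severity_levels.get(event.get('severity', 'low'), 0)
--             if level < min_level: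
--                 continue
--             if level == 3:
--                 b3.append(event)
--             elif level == 2:
--                 b2.append(event)
--             elif level == 1:
--                 b1.append(event)
--             else:
--                 b0.append(event)
--     return b3 + b2 + b1 + b0
-- ===== Notes on version B (the rewrite author's own statement) =====
-- stated objective: alternative
-- what changed: Replaces A's filter-into-a-list followed by a stable reverse comparison sort with a single pass that drops events below min_level and appends each kept event to one of four fixed severity buckets, returned concatenated high-to-low; it trades the comparison sort for a fixed-bucket pass of linear growth but loses to CPython's C-level sort in constants.
import Mathlib
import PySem

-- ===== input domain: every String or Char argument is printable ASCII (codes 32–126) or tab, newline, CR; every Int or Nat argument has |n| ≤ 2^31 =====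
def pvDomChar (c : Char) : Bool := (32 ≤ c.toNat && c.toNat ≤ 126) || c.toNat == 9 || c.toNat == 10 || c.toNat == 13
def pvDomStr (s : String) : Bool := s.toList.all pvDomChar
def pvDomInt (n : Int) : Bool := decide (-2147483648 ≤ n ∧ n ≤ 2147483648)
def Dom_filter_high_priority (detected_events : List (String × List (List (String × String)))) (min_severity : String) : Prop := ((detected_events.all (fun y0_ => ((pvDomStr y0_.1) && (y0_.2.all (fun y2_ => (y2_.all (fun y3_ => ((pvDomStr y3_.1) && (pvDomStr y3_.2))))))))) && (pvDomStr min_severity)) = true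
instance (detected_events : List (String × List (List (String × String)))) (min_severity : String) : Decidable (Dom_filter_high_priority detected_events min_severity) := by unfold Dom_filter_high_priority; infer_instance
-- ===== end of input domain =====

-- B replaces A's filter-then-stable-reverse-sort by a single bucket pass over the four
-- severity levels (counting sort); same return value, different algorithm.


-- ===== PORT A =====
-- severity_levels = {'low': 0, 'medium': 1, 'high': 2, 'critical': 3}
def pvSevLevels : PySem.Dict String Int :=
  ⟨[("low", 0), ("medium", 1), ("high", 2), ("critical", 3)]⟩

-- severity_levels.get(event.get('severity', 'low'), 0)  (shared subexpression of both Pythons)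
def pvLevel (e : List (String × String)) : Int :=
  pvSevLevels.getD (PySem.Dict.getD ⟨e⟩ "severity" "low") 0

def filter_high_priority (detected_events : List (String × List (List (String × String)))) (min_severity : String) : List (List (String × String)) :=
  let min_level := pvSevLevels.getD min_severity 1
  let priority_events := detected_events.foldl (fun acc p =>
    p.2.foldl (fun acc e => if pvLevel e ≥ min_level then acc ++ [e] else acc) acc) []
  PySem.List.sorted priority_events (fun e => pvLevel e) true

-- ===== PORT B =====
-- one step of B's bucket pass: drop below min_level, else append to the level's bucket
def pvBStep (min_level : Int)
    (bs : List (List (String × String)) × List (List (String × String)) × List (List (String × String)) × List (List (String × String)))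
    (e : List (String × String)) :
    List (List (String × String)) × List (List (String × String)) × List (List (String × String)) × List (List (String × String)) :=
  let lvl := pvLevel e
  if lvl < min_level then bs
  else if lvl = 3 then (bs.1, bs.2.1, bs.2.2.1, bs.2.2.2 ++ [e])
  else if lvl = 2 then (bs.1, bs.2.1, bs.2.2.1 ++ [e], bs.2.2.2)
  else if lvl = 1 then (bs.1, bs.2.1 ++ [e], bs.2.2.1, bs.2.2.2)
  else (bs.1 ++ [e], bs.2.1, bs.2.2.1, bs.2.2.2)

def filter_high_priority_alt (detected_events : List (String × List (List (String × String)))) (min_severity : String) : List (List (String × String)) :=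
  let min_level := pvSevLevels.getD min_severity 1
  let bs := detected_events.foldl (fun bs p => p.2.foldl (pvBStep min_level) bs) (([], [], [], []))
  bs.2.2.2 ++ bs.2.2.1 ++ bs.2.1 ++ bs.1

-- ===== PRECONDITION & SPEC =====
def Spec_filter_high_priority (detected_events : List (String × List (List (String × String)))) (min_severity : String) (out : List (List (String × String))) : Prop := out = filter_high_priority_alt detected_events min_severity
instance (detected_events : List (String × List (List (String × String)))) (min_severity : String) (out : List (List (String × String))) : Decidable (Spec_filter_high_priority detected_events min_severity out) := by unfold Spec_filter_high_priority; infer_instance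

-- ===== CLAIM (what is proved, stated in full; the proofs are below) =====
def Claim_equal_filter_high_priority : Prop := ∀ (detected_events : List (String × List (List (String × String)))) (min_severity : String), Dom_filter_high_priority detected_events min_severity → Spec_filter_high_priority detected_events min_severity (filter_high_priority detected_events min_severity)

-- ===== LEMMAS AND PROOFS =====

-- pvLevel only takes the four values 0..3
theorem pvLevel_mem (e : List (String × String)) :
    pvLevel e = 0 ∨ pvLevel e = 1 ∨ pvLevel e = 2 ∨ pvLevel e = 3 := by
  unfold pvLevel pvSevLevels
  generalize (PySem.Dict.getD (⟨e⟩ : PySem.Dict String String) "severity" "low") = s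
  simp only [PySem.Dict.getD, PySem.Dict.get?, List.find?]
  rcases h1 : ("low" == s) <;> rcases h2 : ("medium" == s) <;>
    rcases h3 : ("high" == s) <;> rcases h4 : ("critical" == s) <;> simp

-- buckets of a list by level (with / without the min_level cut)
def pvG (i : Int) (l : List (List (String × String))) : List (List (String × String)) :=
  l.filter (fun e => decide (pvLevel e = i))

def pvF (b i : Int) (l : List (List (String × String))) : List (List (String × String)) :=
  l.filter (fun e => decide (b ≤ pvLevel e) && decide (pvLevel e = i))

theorem pvG_single (i : Int) (x : List (String × String)) :
    pvG i [x] = if pvLevel x = i then [x] else [] := by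
  simp [pvG, List.filter_cons]

theorem pvG_append (i : Int) (l r : List (List (String × String))) :
    pvG i (l ++ r) = pvG i l ++ pvG i r := List.filter_append ..

theorem pvG_mem {i : Int} {l : List (List (String × String))} {y : List (String × String)}
    (h : y ∈ pvG i l) : pvLevel y = i := by
  have := List.of_mem_filter h; simpa using this

-- A's accumulation loop is append of the filtered events
theorem pvA_inner (b : Int) (evs : List (List (String × String))) (acc : List (List (String × String))) :
    evs.foldl (fun acc e => if pvLevel e ≥ b then acc ++ [e] else acc) acc
      = acc ++ evs.filter (fun e => decide (b ≤ pvLevel e)) := by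
  induction evs generalizing acc with
  | nil => simp
  | cons e evs ih =>
    simp only [List.foldl_cons, List.filter_cons]
    by_cases h : pvLevel e ≥ b <;> simp [h, ih]

theorem pvA_outer (b : Int) (de : List (String × List (List (String × String)))) (acc : List (List (String × String))) :
    de.foldl (fun acc p =>
        p.2.foldl (fun acc e => if pvLevel e ≥ b then acc ++ [e] else acc) acc) acc
      = acc ++ (de.flatMap (fun p => p.2)).filter (fun e => decide (b ≤ pvLevel e)) := by
  induction de generalizing acc with
  | nil => simp
  | cons p de ih =>
    simp only [List.foldl_cons]
    rw [pvA_inner, ih, List.flatMap_cons, List.filter_append, List.append_assoc]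

-- B's bucket pass appends each admitted event to its level's bucket
theorem pvB_inner (b : Int) (evs : List (List (String × String)))
    (t0 t1 t2 t3 : List (List (String × String))) :
    evs.foldl (pvBStep b) (t0, t1, t2, t3)
      = (t0 ++ pvF b 0 evs, t1 ++ pvF b 1 evs, t2 ++ pvF b 2 evs, t3 ++ pvF b 3 evs) := by
  induction evs generalizing t0 t1 t2 t3 with
  | nil => simp [pvF]
  | cons e evs ih =>
    simp only [List.foldl_cons]
    by_cases hb : pvLevel e < b
    · have hb' : ¬ b ≤ pvLevel e := by omega
      simp [pvBStep, pvF, hb, hb', ih]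
    · have hb' : b ≤ pvLevel e := by omega
      rcases pvLevel_mem e with h | h | h | h <;>
        rw [h] at hb hb' <;>
          simp [pvBStep, pvF, h, hb, hb', ih, List.append_assoc]

theorem pvB_outer (b : Int) (de : List (String × List (List (String × String))))
    (t0 t1 t2 t3 : List (List (String × String))) :
    de.foldl (fun bs p => p.2.foldl (pvBStep b) bs) (t0, t1, t2, t3)
      = (t0 ++ pvF b 0 (de.flatMap (fun p => p.2)), t1 ++ pvF b 1 (de.flatMap (fun p => p.2)),
         t2 ++ pvF b 2 (de.flatMap (fun p => p.2)), t3 ++ pvF b 3 (de.flatMap (fun p => p.2))) := by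
  induction de generalizing t0 t1 t2 t3 with
  | nil => simp [pvF]
  | cons p de ih =>
    simp only [List.foldl_cons, pvB_inner, ih, List.flatMap_cons]
    simp [pvF, List.filter_append, List.append_assoc]

-- insertBy walks past a block it does not go before
theorem pv_insert_skip {before : List (String × String) → List (String × String) → Bool}
    {x : List (String × String)} (l r : List (List (String × String)))
    (h : ∀ y ∈ l, before x y = false) :
    PySem.List.insertBy before x (l ++ r) = l ++ PySem.List.insertBy before x r := by
  induction l with
  | nil => simp
  | cons y l ih =>
    have hy := h y (by simp)
    rw [List.cons_append,
      show PySem.List.insertBy before x (y :: (l ++ r)) = if before x y then x :: y :: (l ++ r) else y :: PySem.List.insertBy before x (l ++ r) from rfl,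
      ih (fun z hz => h z (by simp [hz]))]
    simp [hy]

theorem pv_insert_front {before : List (String × String) → List (String × String) → Bool}
    {x : List (String × String)} (l : List (List (String × String)))
    (h : ∀ y ∈ l, before x y = true) :
    PySem.List.insertBy before x l = x :: l := by
  cases l with
  | nil => rfl
  | cons y l =>
    rw [show PySem.List.insertBy before x (y :: l) = if before x y then x :: y :: l else y :: PySem.List.insertBy before x l from rfl]
    simp [h y (by simp)]

-- inserting x into the bucket concatenation appends it to the end of its own bucket
theorem pv_insert_buckets (p : List (List (String × String))) (x : List (String × String)) :
    PySem.List.insertBy (fun a b => decide (pvLevel b < pvLevel a)) x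
        (pvG 3 p ++ pvG 2 p ++ pvG 1 p ++ pvG 0 p)
      = pvG 3 (p ++ [x]) ++ pvG 2 (p ++ [x]) ++ pvG 1 (p ++ [x]) ++ pvG 0 (p ++ [x]) := by
  rcases pvLevel_mem x with hx | hx | hx | hx
  · -- level 0: x goes after everything
    rw [PySem.List.insertBy_of_forall_not_before _ _ _ (by
      intro y hy
      simp only [List.mem_append] at hy
      rcases hy with ((h | h) | h) | h <;> simp [pvG_mem h, hx])]
    simp [pvG_append, pvG_single, hx, List.append_assoc]
  · -- level 1: skip buckets 3,2,1 then go before bucket 0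
    rw [show pvG 3 p ++ pvG 2 p ++ pvG 1 p ++ pvG 0 p
          = (pvG 3 p ++ pvG 2 p ++ pvG 1 p) ++ pvG 0 p by simp [List.append_assoc]]
    rw [pv_insert_skip _ _ (by
      intro y hy
      simp only [List.mem_append] at hy
      rcases hy with (h | h) | h <;> simp [pvG_mem h, hx])]
    rw [pv_insert_front _ (by intro y hy; simp [pvG_mem hy, hx])]
    simp [pvG_append, pvG_single, hx, List.append_assoc]
  · -- level 2: skip buckets 3,2
    rw [show pvG 3 p ++ pvG 2 p ++ pvG 1 p ++ pvG 0 p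
          = (pvG 3 p ++ pvG 2 p) ++ (pvG 1 p ++ pvG 0 p) by simp [List.append_assoc]]
    rw [pv_insert_skip _ _ (by
      intro y hy
      simp only [List.mem_append] at hy
      rcases hy with h | h <;> simp [pvG_mem h, hx])]
    rw [pv_insert_front _ (by
      intro y hy
      simp only [List.mem_append] at hy
      rcases hy with h | h <;> simp [pvG_mem h, hx])]
    simp [pvG_append, pvG_single, hx, List.append_assoc]
  · -- level 3: skip bucket 3 only
    rw [show pvG 3 p ++ pvG 2 p ++ pvG 1 p ++ pvG 0 p
          = pvG 3 p ++ (pvG 2 p ++ pvG 1 p ++ pvG 0 p) by simp [List.append_assoc]]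
    rw [pv_insert_skip _ _ (by intro y hy; simp [pvG_mem hy, hx])]
    rw [pv_insert_front _ (by
      intro y hy
      simp only [List.mem_append] at hy
      rcases hy with (h | h) | h <;> simp [pvG_mem h, hx])]
    simp [pvG_append, pvG_single, hx, List.append_assoc]

-- the stable reverse sort of any list of events is its buckets, high to low
theorem pv_sort_fold (L p : List (List (String × String))) :
    L.foldl (fun acc x => PySem.List.insertBy (fun a b => decide (pvLevel b < pvLevel a)) x acc)
        (pvG 3 p ++ pvG 2 p ++ pvG 1 p ++ pvG 0 p)
      = pvG 3 (p ++ L) ++ pvG 2 (p ++ L) ++ pvG 1 (p ++ L) ++ pvG 0 (p ++ L) := by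
  induction L generalizing p with
  | nil => simp
  | cons x L ih =>
    simp only [List.foldl_cons, pv_insert_buckets]
    rw [ih (p ++ [x])]
    simp

theorem pv_sorted_buckets (L : List (List (String × String))) :
    PySem.List.sorted L (fun e => pvLevel e) true
      = pvG 3 L ++ pvG 2 L ++ pvG 1 L ++ pvG 0 L := by
  have h := pv_sort_fold L []
  simpa [PySem.List.sorted_rev_eq_foldl_insertBy, pvG] using h

-- the min-level cut then the bucket split is the joint filter
theorem pvF_eq_G_filter (b i : Int) (L : List (List (String × String))) :
    pvG i (L.filter (fun e => decide (b ≤ pvLevel e))) = pvF b i L := by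
  simp [pvG, pvF, List.filter_filter, Bool.and_comm]

-- ===== VERDICT (by name: the statement is the Claim_ definition above) =====
theorem filter_high_priority_spec : Claim_equal_filter_high_priority := by
  intro de ms _
  unfold Spec_filter_high_priority filter_high_priority filter_high_priority_alt
  simp only [pvA_outer, pvB_outer, List.nil_append, ge_iff_le]
  rw [pv_sorted_buckets]
  simp [pvF_eq_G_filter]
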